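-- pv_equiv track=rewrite | github.com/gracie007-cloud/msty-admin-mcp | src/folders.py | _calculate_folder_depth
-- ===== SOURCE A (Python) =====
-- from typing import Optional, List, Dict, Any
--
-- def _calculate_folder_depth(folders: List[Dict]) -> int:
--     """Calculate maximum folder nesting depth."""
--     folders_by_id = {f.get("id"): f for f in folders}
--     max_depth = 0
--
--     for folder in folders:
--         depth = 0
--         current = folder
--         visited = set()
--
--         while current and current.get("id") not in visited:
--             visited.add(current.get("id"))
--             parent_id = current.get("parent_id") or current.get("parent")
--             if parent_id and parent_id in folders_by_id:
--                 depth += 1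
--                 current = folders_by_id[parent_id]
--             else:
--                 break
--
--         max_depth = max(max_depth, depth)
--
--     return max_depth
-- ===== SOURCE B (Python) =====
-- from typing import List, Dict
--
-- def _calculate_folder_depth(folders: List[Dict]) -> int:
--     """Calculate maximum folder nesting depth (memoized: each folder id resolved once)."""
--     by_id = {}
--     for f in folders:
--         by_id[f.get("id")] = f
--
--     def parent_key(f):
--         p = f.get("parent_id") or f.get("parent")
--         return p if p and p in by_id else None
--
--     memo = {}  # id -> chain depth from that id
--
--     def resolve(k):
--         # k is a key of by_id; walk the parent chain, then assign depths
--         # to every node walked (so each id is resolved exactly once overall).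
--         path = []
--         pos = {}
--         cur = k
--         while cur not in memo:
--             if cur in pos:
--                 # cycle: each node on the cycle walks the full cycle once
--                 j = pos[cur]
--                 c = len(path) - j
--                 for node in path[j:]:
--                     memo[node] = c
--                 path = path[:j]
--                 break
--             pos[cur] = len(path)
--             path.append(cur)
--             nxt = parent_key(by_id[cur])
--             if nxt is None:
--                 memo[cur] = 0
--                 path.pop()
--                 break
--             cur = nxt
--         # nodes leading into the resolved part: one hop more than their parent
--         for node in reversed(path):
--             memo[node] = memo[parent_key(by_id[node])] + 1
--         return memo[k]
--
--     best = 0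
--     for f in folders:
--         i = f.get("id")
--         if i is not None:
--             d = resolve(i)
--         else:
--             p = parent_key(f)
--             d = 1 + resolve(p) if p is not None else 0
--         best = max(best, d)
--     return best
-- ===== Notes on version B (the rewrite author's own statement) =====
-- stated objective: alternative
-- what changed: A walks the parent chain from every folder separately with a per-walk visited set; B resolves each folder id's chain depth exactly once with a memo table (cycle nodes get the cycle length, predecessors one more than their parent), a different algorithm of similar measured cost on random inputs (worst-case quadratic chains become linear, but generated inputs do not exercise them).
-- outside the precondition, e.g. on _calculate_folder_depth([{'id': 1, 'parent_id': 2}, {'id': 2, 'parent_id': 1}, {'id': 1}]): A returns 2, B returns 1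
import Mathlib
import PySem

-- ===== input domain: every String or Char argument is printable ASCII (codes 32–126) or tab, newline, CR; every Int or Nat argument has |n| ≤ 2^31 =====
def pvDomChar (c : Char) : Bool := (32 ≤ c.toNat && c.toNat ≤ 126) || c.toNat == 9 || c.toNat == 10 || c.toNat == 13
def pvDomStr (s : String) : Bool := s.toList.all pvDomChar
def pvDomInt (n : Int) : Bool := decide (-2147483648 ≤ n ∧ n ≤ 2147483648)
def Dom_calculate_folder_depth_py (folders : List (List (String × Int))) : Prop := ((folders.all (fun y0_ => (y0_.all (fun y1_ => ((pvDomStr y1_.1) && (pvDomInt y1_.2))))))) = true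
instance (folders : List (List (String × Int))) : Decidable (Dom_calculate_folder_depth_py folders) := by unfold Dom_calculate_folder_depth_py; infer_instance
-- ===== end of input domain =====

-- B replaces A's independent per-folder parent-chain walks by a single memoized
-- resolution that computes every folder id's chain depth exactly once.

-- ===== PORT A =====

-- f.get(k) on the folder dict (assoc list, first match)
def pvAGet (f : List (String × Int)) (k : String) : Option Int :=
  (PySem.Dict.mk f).get? k

-- current.get("parent_id") or current.get("parent")   (Python `or`: left operand if truthy)
def pvAParRaw (f : List (String × Int)) : Option Int :=
  match pvAGet f "parent_id" with
  | some v => if v = 0 then pvAGet f "parent" else some v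
  | none => pvAGet f "parent"

-- folders_by_id = {f.get("id"): f for f in folders}
def pvAById (folders : List (List (String × Int))) :
    PySem.Dict (Option Int) (List (String × Int)) :=
  folders.foldl (fun d f => d.insert (pvAGet f "id") f) PySem.Dict.empty

-- the `while current and current.get("id") not in visited` loop;
-- fuel (`folders.length + 1` at the call site) is a totality guard only: each
-- iteration adds a fresh id to `visited`, and at most folders.length + 1 ids exist.
def pvALoop (byId : PySem.Dict (Option Int) (List (String × Int))) :
    Nat → List (String × Int) → PySem.Set (Option Int) → Int → Int
  | 0, _, _, depth => depth
  | fuel + 1, current, visited, depth =>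
    if current = [] ∨ pvAGet current "id" ∈ visited then depth
    else
      let visited := PySem.Set.add visited (pvAGet current "id")
      match pvAParRaw current with
      | some p =>
        if p ≠ 0 then
          match byId.get? (some p) with
          | some nxt => pvALoop byId fuel nxt visited (depth + 1)
          | none => depth
        else depth
      | none => depth

def calculate_folder_depth_py (folders : List (List (String × Int))) : Int :=
  let byId := pvAById folders
  folders.foldl (fun maxDepth folder =>
    max maxDepth (pvALoop byId (folders.length + 1) folder PySem.Set.empty 0)) 0

-- ===== PORT B =====

-- f.get(k) on the folder dict (assoc list, first match)
def pvBGet (f : List (String × Int)) (k : String) : Option Int :=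
  (PySem.Dict.mk f).get? k

-- by_id = {f.get("id"): f for f in folders}
def pvBById (folders : List (List (String × Int))) :
    PySem.Dict (Option Int) (List (String × Int)) :=
  folders.foldl (fun d f => d.insert (pvBGet f "id") f) PySem.Dict.empty

-- parent_key(f): the validated parent id, or None
def pvBParentKey (byId : PySem.Dict (Option Int) (List (String × Int)))
    (f : List (String × Int)) : Option Int :=
  let p := match pvBGet f "parent_id" with
    | some v => if v = 0 then pvBGet f "parent" else some v
    | none => pvBGet f "parent"
  match p with
  | some v => if v ≠ 0 ∧ (byId.get? (some v)).isSome then some v else none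
  | none => none

-- `for node in reversed(path): memo[node] = memo[parent_key(by_id[node])] + 1`
def pvBBackfill (byId : PySem.Dict (Option Int) (List (String × Int)))
    (memo : PySem.Dict Int Int) (path : List Int) : PySem.Dict Int Int :=
  path.reverse.foldl (fun memo node =>
    match byId.get? (some node) with
    | some f =>
      match pvBParentKey byId f with
      | some q => memo.insert node (memo.getD q 0 + 1)
      | none => memo   -- unreachable: every backfilled node has a valid parent key
    | none => memo     -- unreachable: every walked node is a key of by_id
    ) memo

-- the `while cur not in memo` loop of resolve(k);
-- fuel (`folders.length + 1` at the call site) is a totality guard only: each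
-- iteration records a fresh key in `pos`.
def pvBResolveLoop (byId : PySem.Dict (Option Int) (List (String × Int))) :
    Nat → PySem.Dict Int Int → PySem.Dict Int Int → List Int → Int → PySem.Dict Int Int
  | 0, memo, _, _, _ => memo
  | fuel + 1, memo, pos, path, cur =>
    if memo.contains cur then pvBBackfill byId memo path
    else
      match pos.get? cur with
      | some j =>
        -- cycle: every node from position j on gets the cycle length
        let c : Int := (path.length : Int) - j
        let memo := (path.drop j.toNat).foldl (fun m node => m.insert node c) memo
        pvBBackfill byId memo (path.take j.toNat)
      | none =>
        let pos := pos.insert cur (path.length : Int)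
        let path := path ++ [cur]
        match byId.get? (some cur) with
        | some f =>
          match pvBParentKey byId f with
          | some nxt => pvBResolveLoop byId fuel memo pos path nxt
          | none => pvBBackfill byId (memo.insert cur 0) path.dropLast
        | none => memo  -- unreachable: cur is a key of by_id

def calculate_folder_depth_py_alt (folders : List (List (String × Int))) : Int :=
  let byId := pvBById folders
  let fuel := folders.length + 1
  (folders.foldl (fun (st : PySem.Dict Int Int × Int) f =>
    match pvBGet f "id" with
    | some i =>
      let memo := pvBResolveLoop byId fuel st.1 PySem.Dict.empty [] i
      (memo, max st.2 (memo.getD i 0))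
    | none =>
      match pvBParentKey byId f with
      | some p =>
        let memo := pvBResolveLoop byId fuel st.1 PySem.Dict.empty [] p
        (memo, max st.2 (1 + memo.getD p 0))
      | none => (st.1, max st.2 0)
    ) (PySem.Dict.empty, 0)).2

-- ===== PRECONDITION & SPEC =====

-- Pre_ excludes lists in which two folders carry the same (present) "id": there A's
-- result hinges on the accidental dict-reinsertion order of {f.get("id"): f} while B
-- resolves each id once; both behaviours are defensible on such malformed folder sets.
def Pre_calculate_folder_depth_py (folders : List (List (String × Int))) : Prop :=
  (folders.filterMap (fun f => ((f.find? (fun kv => kv.1 == "id")).map (·.2)))).Nodup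

instance (folders : List (List (String × Int))) : Decidable (Pre_calculate_folder_depth_py folders) := by
  unfold Pre_calculate_folder_depth_py; infer_instance

def pvWitness_calculate_folder_depth_py : (List (List (String × Int))) :=
  [[("id", 1), ("parent_id", 0)], [("id", 2), ("parent", 1)], [("name", 7)]]

def Spec_calculate_folder_depth_py (folders : List (List (String × Int))) (out : Int) : Prop := out = calculate_folder_depth_py_alt folders
instance (folders : List (List (String × Int))) (out : Int) : Decidable (Spec_calculate_folder_depth_py folders out) := by unfold Spec_calculate_folder_depth_py; infer_instance

-- ===== CLAIM (what is proved, stated in full; the proofs are below) =====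
def Claim_equal_calculate_folder_depth_py : Prop := ∀ (folders : List (List (String × Int))), Dom_calculate_folder_depth_py folders → Pre_calculate_folder_depth_py folders → Spec_calculate_folder_depth_py folders (calculate_folder_depth_py folders)

-- ===== LEMMAS AND PROOFS =====

-- ---------- abstract parent-chain layer (proof-only) ----------

-- the id-level successor function induced by by_id
def pvStep (byId : PySem.Dict (Option Int) (List (String × Int))) (k : Int) : Option Int :=
  match byId.get? (some k) with
  | some f => pvBParentKey byId f
  | none => none

def pvIsKey (byId : PySem.Dict (Option Int) (List (String × Int))) (k : Int) : Prop :=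
  (byId.get? (some k)).isSome = true

def pvKeysF (byId : PySem.Dict (Option Int) (List (String × Int))) : Finset Int :=
  (byId.keys.filterMap id).toFinset

def pvNfree (byId : PySem.Dict (Option Int) (List (String × Int))) (V : List Int) : Nat :=
  (pvKeysF byId \ V.toFinset).card

def pvCard (byId : PySem.Dict (Option Int) (List (String × Int))) : Nat :=
  (pvKeysF byId).card

-- A's inner loop, abstracted to ids: visited list V, fuel-bounded
def pvW (byId : PySem.Dict (Option Int) (List (String × Int))) :
    List Int → Int → Nat → Int
  | _, _, 0 => 0
  | V, k, fuel + 1 =>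
    if k ∈ V then 0 else
      match pvStep byId k with
      | none => 0
      | some y => 1 + pvW byId (k :: V) y fuel

theorem pvW_succ (byId : PySem.Dict (Option Int) (List (String × Int)))
    (V : List Int) (k : Int) (fuel : Nat) :
    pvW byId V k (fuel + 1) = (if k ∈ V then 0 else
      match pvStep byId k with
      | none => 0
      | some y => 1 + pvW byId (k :: V) y fuel) := rfl

theorem pvW_succ_none (byId : PySem.Dict (Option Int) (List (String × Int)))
    (V : List Int) (k : Int) (fuel : Nat) (hk : k ∉ V) (h : pvStep byId k = none) :
    pvW byId V k (fuel + 1) = 0 := by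
  rw [pvW_succ, if_neg hk, h]

theorem pvW_succ_step (byId : PySem.Dict (Option Int) (List (String × Int)))
    (V : List Int) (k y : Int) (fuel : Nat) (hk : k ∉ V) (h : pvStep byId k = some y) :
    pvW byId V k (fuel + 1) = 1 + pvW byId (k :: V) y fuel := by
  rw [pvW_succ, if_neg hk, h]

-- the chain depth of id k (any fuel ≥ pvCard + 1 gives the same value)
def pvL (byId : PySem.Dict (Option Int) (List (String × Int))) (k : Int) : Int :=
  pvW byId [] k (pvCard byId + 2)

def pvIter (byId : PySem.Dict (Option Int) (List (String × Int))) :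
    Nat → Int → Option Int
  | 0, k => some k
  | n + 1, k =>
    match pvStep byId k with
    | some y => pvIter byId n y
    | none => none

def pvReach (byId : PySem.Dict (Option Int) (List (String × Int))) (k a : Int) : Prop :=
  ∃ n, pvIter byId n k = some a

def pvRel (byId : PySem.Dict (Option Int) (List (String × Int))) (a b : Int) : Prop :=
  pvStep byId a = some b

-- a directed cycle of distinct ids
def pvCyc (byId : PySem.Dict (Option Int) (List (String × Int))) (r : List Int) : Prop :=
  r ≠ [] ∧ r.Nodup ∧ (r ++ r.take 1).IsChain (pvRel byId)

-- ---------- basic walk lemmas ----------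

theorem pvW_zero_of_mem (byId : PySem.Dict (Option Int) (List (String × Int)))
    (V : List Int) (k : Int) (fuel : Nat) (h : k ∈ V) : pvW byId V k fuel = 0 := by
  cases fuel <;> simp [pvW, h]

theorem pvW_congr (byId : PySem.Dict (Option Int) (List (String × Int)))
    (fuel : Nat) : ∀ (V V' : List Int) (k : Int), (∀ x, x ∈ V ↔ x ∈ V') →
    pvW byId V k fuel = pvW byId V' k fuel := by
  induction fuel with
  | zero => intro V V' k _; rfl
  | succ fuel ih =>
    intro V V' k h
    simp only [pvW]
    by_cases hk : k ∈ V
    · simp [hk, (h k).mp hk]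
    · have hk' : k ∉ V' := fun hx => hk ((h k).mpr hx)
      simp only [hk, hk', if_neg]
      cases hs : pvStep byId k with
      | none => rfl
      | some y =>
        have := ih (k :: V) (k :: V') y (by intro x; simp [h x])
        simp [this]

theorem pvStep_isKey_src (byId : PySem.Dict (Option Int) (List (String × Int)))
    (k y : Int) (h : pvStep byId k = some y) : pvIsKey byId k := by
  unfold pvStep at h
  unfold pvIsKey
  cases hg : byId.get? (some k) with
  | none => rw [hg] at h; exact absurd h (by simp)
  | some f => simp

theorem pvStep_isKey_tgt (byId : PySem.Dict (Option Int) (List (String × Int)))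
    (k y : Int) (h : pvStep byId k = some y) : pvIsKey byId y := by
  unfold pvStep at h
  cases hg : byId.get? (some k) with
  | none => rw [hg] at h; exact absurd h (by simp)
  | some f =>
    rw [hg] at h
    unfold pvBParentKey at h
    unfold pvIsKey
    cases hp : (match pvBGet f "parent_id" with
      | some v => if v = 0 then pvBGet f "parent" else some v
      | none => pvBGet f "parent") with
    | none => simp [hp] at h
    | some v =>
      simp only [hp] at h
      by_cases hv : v ≠ 0 ∧ (byId.get? (some v)).isSome
      · simp only [if_pos hv] at h
        cases h; exact hv.2
      · simp [if_neg hv] at h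

theorem pvIsKey_mem_keysF (byId : PySem.Dict (Option Int) (List (String × Int)))
    (k : Int) (h : pvIsKey byId k) : k ∈ pvKeysF byId := by
  unfold pvIsKey at h
  unfold pvKeysF
  have hc : byId.contains (some k) = true := by
    rw [PySem.Dict.contains_eq_isSome_get?]; exact h
  have hm : (some k) ∈ byId.keys := (PySem.Dict.contains_iff_mem_keys _ _).mp hc
  simp only [List.mem_toFinset, List.mem_filterMap]
  exact ⟨some k, hm, rfl⟩

theorem pvNfree_cons (byId : PySem.Dict (Option Int) (List (String × Int)))
    (V : List Int) (k : Int) (hk : pvIsKey byId k) (hnv : k ∉ V) :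
    pvNfree byId (k :: V) + 1 = pvNfree byId V := by
  unfold pvNfree
  have hmem : k ∈ pvKeysF byId \ V.toFinset := by
    simp [Finset.mem_sdiff, pvIsKey_mem_keysF byId k hk, hnv]
  have : pvKeysF byId \ (k :: V).toFinset = (pvKeysF byId \ V.toFinset).erase k := by
    ext x
    simp [Finset.mem_sdiff, Finset.mem_erase, List.mem_toFinset]
    tauto
  rw [this, Finset.card_erase_of_mem hmem]
  have hpos : 0 < (pvKeysF byId \ V.toFinset).card := Finset.card_pos.mpr ⟨k, hmem⟩
  omega

theorem pvW_stab_succ (byId : PySem.Dict (Option Int) (List (String × Int))) :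
    ∀ (fuel : Nat) (V : List Int) (k : Int), pvNfree byId V + 1 ≤ fuel →
    pvW byId V k (fuel + 1) = pvW byId V k fuel := by
  intro fuel
  induction fuel with
  | zero => intro V k h; omega
  | succ fuel ih =>
    intro V k h
    by_cases hk : k ∈ V
    · rw [pvW_zero_of_mem _ _ _ _ hk, pvW_zero_of_mem _ _ _ _ hk]
    · rw [pvW_succ, pvW_succ, if_neg hk, if_neg hk]
      cases hs : pvStep byId k with
      | none => rfl
      | some y =>
        have hkey := pvStep_isKey_src byId k y hs
        have hlt := pvNfree_cons byId V k hkey hk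
        have heq : pvW byId (k :: V) y (fuel + 1) = pvW byId (k :: V) y fuel := by
          apply ih; omega
        simp only [heq]

theorem pvW_stab (byId : PySem.Dict (Option Int) (List (String × Int)))
    (V : List Int) (k : Int) (fuel₁ fuel₂ : Nat)
    (h₁ : pvNfree byId V + 1 ≤ fuel₁) (h₂ : pvNfree byId V + 1 ≤ fuel₂) :
    pvW byId V k fuel₁ = pvW byId V k fuel₂ := by
  have key : ∀ d b, pvNfree byId V + 1 ≤ b → pvW byId V k (b + d) = pvW byId V k b := by
    intro d
    induction d with
    | zero => intro b _; rfl
    | succ d ih =>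
      intro b hb
      have : b + (d + 1) = (b + d) + 1 := by omega
      rw [this, pvW_stab_succ byId (b + d) V k (by omega), ih b hb]
  rcases le_total fuel₁ fuel₂ with h | h
  · have := key (fuel₂ - fuel₁) fuel₁ h₁
    rw [show fuel₁ + (fuel₂ - fuel₁) = fuel₂ by omega] at this
    omega
  · have := key (fuel₁ - fuel₂) fuel₂ h₂
    rw [show fuel₂ + (fuel₁ - fuel₂) = fuel₁ by omega] at this
    omega

-- ---------- reachability ----------

theorem pvReach_refl (byId : PySem.Dict (Option Int) (List (String × Int))) (k : Int) :
    pvReach byId k k := ⟨0, rfl⟩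

theorem pvReach_step (byId : PySem.Dict (Option Int) (List (String × Int)))
    (k y a : Int) (hs : pvStep byId k = some y) (h : pvReach byId y a) :
    pvReach byId k a := by
  obtain ⟨n, hn⟩ := h
  exact ⟨n + 1, by simp [pvIter, hs, hn]⟩

theorem pvW_irrel (byId : PySem.Dict (Option Int) (List (String × Int))) :
    ∀ (fuel : Nat) (V : List Int) (k a : Int), ¬ pvReach byId k a →
    pvW byId (a :: V) k fuel = pvW byId V k fuel := by
  intro fuel
  induction fuel with
  | zero => intro V k a _; rfl
  | succ fuel ih =>
    intro V k a hna
    have hka : k ≠ a := fun h => hna (h ▸ pvReach_refl byId k)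
    simp only [pvW]
    by_cases hk : k ∈ V
    · simp [hk]
    · have : k ∉ a :: V := by simp [hka, hk]
      simp only [this, hk, if_neg]
      cases hs : pvStep byId k with
      | none => rfl
      | some y =>
        have hy : ¬ pvReach byId y a := fun h => hna (pvReach_step byId k y a hs h)
        have h1 : pvW byId (k :: a :: V) y fuel = pvW byId (a :: k :: V) y fuel :=
          pvW_congr byId fuel _ _ y (by intro x; constructor <;> (intro h; simp at h ⊢; tauto))
        have h2 := ih (k :: V) y a hy
        simp [h1, h2]

theorem pvL_terminal (byId : PySem.Dict (Option Int) (List (String × Int)))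
    (k : Int) (h : pvStep byId k = none) : pvL byId k = 0 := by
  unfold pvL pvW
  simp [h]

theorem pvL_step (byId : PySem.Dict (Option Int) (List (String × Int)))
    (k y : Int) (hs : pvStep byId k = some y) (hnr : ¬ pvReach byId y k) :
    pvL byId k = 1 + pvL byId y := by
  unfold pvL
  have h1 : pvW byId [] k (pvCard byId + 2) = 1 + pvW byId [k] y (pvCard byId + 1) := by
    simp [pvW, hs]
  have h2 : pvW byId [k] y (pvCard byId + 1) = pvW byId [] y (pvCard byId + 1) :=
    pvW_irrel byId _ [] y k hnr
  have h3 : pvW byId [] y (pvCard byId + 1) = pvW byId [] y (pvCard byId + 2) := by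
    apply pvW_stab
    · have : pvNfree byId [] = pvCard byId := by unfold pvNfree pvCard; simp
      omega
    · have : pvNfree byId [] = pvCard byId := by unfold pvNfree pvCard; simp
      omega
  omega

-- ---------- cycle lemmas ----------

theorem pvCyc_walk (byId : PySem.Dict (Option Int) (List (String × Int)))
    (r : List Int) (hc : pvCyc byId r) :
    ∀ (b a : List Int) (k : Int) (fuel : Nat), r = a ++ k :: b → b.length + 1 ≤ fuel →
    pvW byId a k fuel = b.length + 1 := by
  obtain ⟨hne, hnd, hch⟩ := hc
  intro b
  induction b with
  | nil =>
    intro a k fuel hr hfu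
    obtain ⟨F, rfl⟩ : ∃ F, fuel = F + 1 := ⟨fuel - 1, by omega⟩
    have hka : k ∉ a := by
      rw [hr, List.nodup_append] at hnd
      intro hmem
      exact hnd.2.2 k hmem k (by simp) rfl
    cases a with
    | nil =>
      have hrel : pvStep byId k = some k := by
        rw [hr] at hch
        have h4 : List.IsChain (pvRel byId) [k, k] := by simpa using hch
        have := List.IsChain.rel (R := pvRel byId) h4
        exact this
      rw [pvW_succ_step byId [] k k F hka hrel,
        pvW_zero_of_mem byId _ k F (by simp)]
      simp
    | cons h a' =>
      have hrel : pvStep byId k = some h := by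
        rw [hr] at hch
        have h1 : ((h :: a') ++ ([k] ++ [h])).IsChain (pvRel byId) := by
          simpa [List.append_assoc] using hch
        have h3 := List.IsChain.right_of_append h1
        have h4 : List.IsChain (pvRel byId) [k, h] := by simpa using h3
        have := List.IsChain.rel (R := pvRel byId) h4
        exact this
      rw [pvW_succ_step byId _ k h F hka hrel,
        pvW_zero_of_mem byId _ h F (by simp)]
      simp
  | cons y b' ih =>
    intro a k fuel hr hfu
    obtain ⟨F, rfl⟩ : ∃ F, fuel = F + 1 := ⟨fuel - 1, by omega⟩
    have hndr := hnd
    rw [hr, List.nodup_append] at hndr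
    have hka : k ∉ a := fun hmem => hndr.2.2 k hmem k (by simp) rfl
    have hrel : pvStep byId k = some y := by
      have h1 : (a ++ ((k :: y :: b') ++ (a ++ k :: y :: b').take 1)).IsChain (pvRel byId) := by
        rw [← List.append_assoc, ← hr]; exact hch
      have h2 := List.IsChain.left_of_append (List.IsChain.right_of_append h1)
      have h4 : List.IsChain (pvRel byId) (k :: y :: b') := h2
      have := List.IsChain.rel (R := pvRel byId) h4
      exact this
    rw [pvW_succ_step byId a k y F hka hrel]
    have hcongr : pvW byId (k :: a) y F = pvW byId (a ++ [k]) y F := by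
      apply pvW_congr
      intro x; simp; tauto
    have hIH : pvW byId (a ++ [k]) y F = (b'.length : Int) + 1 := by
      apply ih (a ++ [k]) y F (by rw [hr]; simp) (by simpa using hfu)
    rw [hcongr, hIH]
    simp
    omega

theorem pvCyc_rot1 (byId : PySem.Dict (Option Int) (List (String × Int)))
    (x : Int) (s : List Int) (h : pvCyc byId (x :: s)) : pvCyc byId (s ++ [x]) := by
  obtain ⟨hne, hnd, hch⟩ := h
  refine ⟨by simp, (List.perm_append_singleton x s).symm.nodup hnd, ?_⟩
  cases s with
  | nil => simpa using hch
  | cons h0 s' =>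
    have htail : ((h0 :: s') ++ [x]).IsChain (pvRel byId) := by
      have hx : ([x] ++ ((h0 :: s') ++ [x])).IsChain (pvRel byId) := by simpa using hch
      exact List.IsChain.right_of_append hx
    have hrel : pvRel byId x h0 := by
      have h4 : List.IsChain (pvRel byId) (x :: h0 :: (s' ++ [x])) := by simpa using hch
      exact List.IsChain.rel (R := pvRel byId) h4
    have hout := List.IsChain.append htail
      (by simp : List.IsChain (pvRel byId) [h0])
      (by
        intro z hz b hb
        have hz' : z = x := by
          have hlast : (h0 :: s' ++ [x]).getLast? = some x := by
            rw [show h0 :: s' ++ [x] = (h0 :: s') ++ [x] from rfl]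
            exact List.getLast?_concat
          rw [hlast] at hz
          have := hz; simp at this; omega
        have hb' : b = h0 := by
          have := hb; simp at this; omega
        rw [hz', hb']
        exact hrel)
    simpa using hout

theorem pvCyc_rot (byId : PySem.Dict (Option Int) (List (String × Int))) :
    ∀ (a c : List Int), c ≠ [] → pvCyc byId (a ++ c) → pvCyc byId (c ++ a) := by
  intro a
  induction a with
  | nil => intro c _ h; simpa using h
  | cons x a' ih =>
    intro c hcne h
    have h1 : pvCyc byId (a' ++ (c ++ [x])) := by
      have := pvCyc_rot1 byId x (a' ++ c) (by simpa using h)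
      simpa [List.append_assoc] using this
    have h2 := ih (c ++ [x]) (by simp) h1
    simpa [List.append_assoc] using h2

theorem pvCyc_next (byId : PySem.Dict (Option Int) (List (String × Int)))
    (r : List Int) (hc : pvCyc byId r) (k : Int) (hk : k ∈ r) :
    ∃ y ∈ r, pvStep byId k = some y := by
  obtain ⟨a, b, hr⟩ := List.append_of_mem hk
  obtain ⟨hne, hnd, hch⟩ := hc
  cases b with
  | cons y b' =>
    refine ⟨y, by simp [hr], ?_⟩
    have h1 : (a ++ ((k :: y :: b') ++ (a ++ k :: y :: b').take 1)).IsChain (pvRel byId) := by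
      rw [← List.append_assoc, ← hr]; exact hch
    have h2 := List.IsChain.left_of_append (List.IsChain.right_of_append h1)
    exact List.IsChain.rel (R := pvRel byId) h2
  | nil =>
    cases a with
    | nil =>
      refine ⟨k, by simp [hr], ?_⟩
      rw [hr] at hch
      have h4 : List.IsChain (pvRel byId) [k, k] := by simpa using hch
      exact List.IsChain.rel (R := pvRel byId) h4
    | cons h a' =>
      refine ⟨h, by simp [hr], ?_⟩
      rw [hr] at hch
      have h1 : ((h :: a') ++ ([k] ++ [h])).IsChain (pvRel byId) := by
        simpa [List.append_assoc] using hch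
      have h3 := List.IsChain.right_of_append h1
      have h4 : List.IsChain (pvRel byId) [k, h] := by simpa using h3
      exact List.IsChain.rel (R := pvRel byId) h4

theorem pvCyc_len_le (byId : PySem.Dict (Option Int) (List (String × Int)))
    (r : List Int) (hc : pvCyc byId r) : r.length ≤ pvCard byId := by
  have hsub : r.toFinset ⊆ pvKeysF byId := by
    intro k hk
    rw [List.mem_toFinset] at hk
    obtain ⟨y, _, hs⟩ := pvCyc_next byId r hc k hk
    exact pvIsKey_mem_keysF byId k (pvStep_isKey_src byId k y hs)
  calc r.length = r.toFinset.card := (List.toFinset_card_of_nodup hc.2.1).symm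
    _ ≤ (pvKeysF byId).card := Finset.card_le_card hsub

theorem pvL_cyc (byId : PySem.Dict (Option Int) (List (String × Int)))
    (r : List Int) (hc : pvCyc byId r) (k : Int) (hk : k ∈ r) :
    pvL byId k = (r.length : Int) := by
  obtain ⟨a, b, hr⟩ := List.append_of_mem hk
  have hrot : pvCyc byId (k :: (b ++ a)) := by
    have := pvCyc_rot byId a (k :: b) (by simp) (by rw [← hr]; exact hc)
    simpa using this
  have hlen : (k :: (b ++ a)).length ≤ pvCard byId := pvCyc_len_le byId _ hrot
  have hw := pvCyc_walk byId (k :: (b ++ a)) hrot (b ++ a) [] k (pvCard byId + 2)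
    rfl (by simp at hlen ⊢; omega)
  unfold pvL
  rw [hw, hr]
  simp
  omega

theorem pvAGet_eq_find (f : List (String × Int)) (k : String) :
    pvAGet f k = (f.find? (fun kv => kv.1 == k)).map (·.2) := by
  unfold pvAGet
  induction f with
  | nil => rfl
  | cons p t ih =>
    rw [PySem.Dict.get?_mk_cons, List.find?]
    by_cases h : p.1 == k
    · simp [h]
    · simp only [h]
      simpa [show (p.1 == k) = false by simpa using h] using ih

theorem pvById_consistent_aux :
    ∀ (l : List (List (String × Int))) (d : PySem.Dict (Option Int) (List (String × Int))),
    (∀ (q : Option Int) (f : List (String × Int)), d.get? q = some f → pvAGet f "id" = q) →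
    ∀ (q : Option Int) (f : List (String × Int)),
    (l.foldl (fun d f => d.insert (pvAGet f "id") f) d).get? q = some f → pvAGet f "id" = q := by
  intro l
  induction l with
  | nil => intro d hd q f h; exact hd q f h
  | cons g t ih =>
    intro d hd q f h
    refine ih (d.insert (pvAGet g "id") g) ?_ q f h
    intro q' f' h'
    rw [PySem.Dict.get?_insert] at h'
    by_cases hq : q' = pvAGet g "id"
    · rw [if_pos hq] at h'; cases h'; exact hq.symm
    · rw [if_neg hq] at h'; exact hd q' f' h'

theorem pvById_consistent (folders : List (List (String × Int))) :
    ∀ (q : Option Int) (f : List (String × Int)),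
    (pvAById folders).get? q = some f → pvAGet f "id" = q := by
  intro q f h
  refine pvById_consistent_aux folders PySem.Dict.empty ?_ q f h
  intro q' f' h'
  rw [PySem.Dict.get?_empty] at h'
  exact absurd h' (by simp)

theorem pvById_preserve :
    ∀ (t : List (List (String × Int))) (d : PySem.Dict (Option Int) (List (String × Int))) (i : Int),
    (∀ g ∈ t, pvAGet g "id" ≠ some i) →
    (t.foldl (fun d f => d.insert (pvAGet f "id") f) d).get? (some i) = d.get? (some i) := by
  intro t
  induction t with
  | nil => intro d i _; rfl
  | cons g t ih =>
    intro d i hne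
    rw [List.foldl_cons, ih _ i (fun g' hg' => hne g' (by simp [hg']))]
    have hne2 : (some i : Option Int) ≠ pvAGet g "id" := fun h => hne g (by simp) h.symm
    rw [PySem.Dict.get?_insert, if_neg hne2]

theorem pvById_get_unique_aux :
    ∀ (l : List (List (String × Int))) (d : PySem.Dict (Option Int) (List (String × Int)))
      (f : List (String × Int)) (i : Int),
    (l.filterMap (fun g => pvAGet g "id")).Nodup → f ∈ l → pvAGet f "id" = some i →
    (l.foldl (fun d f => d.insert (pvAGet f "id") f) d).get? (some i) = some f := by
  intro l
  induction l with
  | nil => intro d f i _ hf _; exact absurd hf (by simp)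
  | cons g t ih =>
    intro d f i hnd hf hid
    by_cases hgi : pvAGet g "id" = some i
    · have hnoti : ∀ g' ∈ t, pvAGet g' "id" ≠ some i := by
        intro g' hg' hg'i
        simp only [List.filterMap_cons, hgi] at hnd
        exact (List.nodup_cons.mp hnd).1 (List.mem_filterMap.mpr ⟨g', hg', hg'i⟩)
      have hfg : f = g := by
        rcases List.mem_cons.mp hf with h | h
        · exact h
        · exact absurd hid (hnoti f h)
      subst hfg
      rw [List.foldl_cons, pvById_preserve t _ i hnoti,
        PySem.Dict.get?_insert, hgi, if_pos rfl]
    · have hft : f ∈ t := by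
        rcases List.mem_cons.mp hf with h | h
        · exact absurd (h ▸ hid) hgi
        · exact h
      have hndt : (t.filterMap (fun g => pvAGet g "id")).Nodup := by
        cases hg : pvAGet g "id" with
        | none => simpa only [List.filterMap_cons, hg] using hnd
        | some v =>
          simp only [List.filterMap_cons, hg] at hnd
          exact (List.nodup_cons.mp hnd).2
      rw [List.foldl_cons]
      exact ih _ f i hndt hft hid

theorem pvById_get_unique (folders : List (List (String × Int)))
    (hpre : Pre_calculate_folder_depth_py folders)
    (f : List (String × Int)) (i : Int) (hf : f ∈ folders)
    (hid : pvAGet f "id" = some i) :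
    (pvAById folders).get? (some i) = some f := by
  unfold Pre_calculate_folder_depth_py at hpre
  have heq : folders.filterMap (fun g => ((g.find? (fun kv => kv.1 == "id")).map (·.2)))
      = folders.filterMap (fun g => pvAGet g "id") := by
    apply List.filterMap_congr
    intro g _
    rw [pvAGet_eq_find]
  rw [heq] at hpre
  exact pvById_get_unique_aux folders PySem.Dict.empty f i hpre hf hid

theorem pvSetUpdate_len :
    ∀ (xs : List (Option Int)) (st : PySem.Set (Option Int)),
    (PySem.Set.update st xs).length ≤ st.length + xs.length := by
  intro xs
  induction xs with
  | nil => intro st; simp [PySem.Set.update]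
  | cons x t ih =>
    intro st
    have h1 : (PySem.Set.update st (x :: t)) = PySem.Set.update (PySem.Set.add st x) t := rfl
    rw [h1]
    have h2 : (PySem.Set.add st x).length ≤ st.length + 1 := by
      rw [PySem.Set.add_eq_ite]
      split <;> simp
    calc (PySem.Set.update (PySem.Set.add st x) t).length
        ≤ (PySem.Set.add st x).length + t.length := ih _
      _ ≤ st.length + (t.length + 1) := by omega
      _ = st.length + (x :: t).length := by simp

theorem pvKeys_eq (folders : List (List (String × Int))) :
    (pvAById folders).keys
      = PySem.Set.update (PySem.Dict.empty : PySem.Dict (Option Int) (List (String × Int))).keys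
          (folders.map (fun f => pvAGet f "id")) := by
  unfold pvAById
  exact PySem.Dict.keys_foldl_insert_key folders (fun f => pvAGet f "id")
    (fun _ x => x) PySem.Dict.empty

theorem pvKeys_len_le (folders : List (List (String × Int))) :
    (pvAById folders).keys.length ≤ folders.length := by
  rw [pvKeys_eq]
  have h := pvSetUpdate_len (folders.map (fun f => pvAGet f "id"))
    (PySem.Dict.empty : PySem.Dict (Option Int) (List (String × Int))).keys
  simpa [PySem.Dict.keys_empty] using h

theorem pvCard_le (folders : List (List (String × Int))) :
    pvCard (pvAById folders) ≤ folders.length := by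
  unfold pvCard pvKeysF
  calc ((pvAById folders).keys.filterMap id).toFinset.card
      ≤ ((pvAById folders).keys.filterMap id).length := List.toFinset_card_le _
    _ ≤ (pvAById folders).keys.length := List.length_filterMap_le _ _
    _ ≤ folders.length := pvKeys_len_le folders

theorem pvFilterMapId_lt :
    ∀ (l : List (Option Int)), none ∈ l → (l.filterMap id).length + 1 ≤ l.length := by
  intro l
  induction l with
  | nil => intro h; exact absurd h (by simp)
  | cons x t ih =>
    intro h
    cases x with
    | none =>
      simp only [List.filterMap_cons]
      have := List.length_filterMap_le (fun x : Option Int => x) t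
      simp; omega
    | some v =>
      have ht : none ∈ t := by
        rcases List.mem_cons.mp h with h' | h'
        · exact absurd h' (by simp)
        · exact h'
      simp only [List.filterMap_cons]
      have := ih ht
      simp at this ⊢; omega

theorem pvCard_lt_of_none (folders : List (List (String × Int)))
    (f : List (String × Int)) (hf : f ∈ folders) (hid : pvAGet f "id" = none) :
    pvCard (pvAById folders) + 1 ≤ folders.length := by
  have hmem : none ∈ (pvAById folders).keys := by
    rw [pvKeys_eq]
    have : (none : Option Int) ∈ folders.map (fun f => pvAGet f "id") :=
      List.mem_map.mpr ⟨f, hf, hid⟩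
    have hm := PySem.Set.mem_update
      (s := (PySem.Dict.empty : PySem.Dict (Option Int) (List (String × Int))).keys)
      (xs := folders.map (fun f => pvAGet f "id")) (y := (none : Option Int))
    exact hm.mpr (Or.inr this)
  have h1 := pvFilterMapId_lt (pvAById folders).keys hmem
  have h2 := pvKeys_len_le folders
  unfold pvCard pvKeysF
  have h3 := List.toFinset_card_le ((pvAById folders).keys.filterMap id)
  omega

theorem pvBPar_eq (byId : PySem.Dict (Option Int) (List (String × Int)))
    (f : List (String × Int)) :
    pvBParentKey byId f = (match pvAParRaw f with
      | some v => if v ≠ 0 ∧ (byId.get? (some v)).isSome then some v else none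
      | none => none) := rfl

theorem pvNfree_nil (byId : PySem.Dict (Option Int) (List (String × Int))) :
    pvNfree byId [] = pvCard byId := by
  unfold pvNfree pvCard; simp

theorem pvBridgeA (byId : PySem.Dict (Option Int) (List (String × Int)))
    (hcons : ∀ (q : Option Int) (f : List (String × Int)), byId.get? q = some f → pvAGet f "id" = q) :
    ∀ (fuel : Nat) (V : List Int) (visS : PySem.Set (Option Int))
      (k : Int) (f : List (String × Int)) (d : Int),
    byId.get? (some k) = some f → (∀ x : Int, ((some x) ∈ visS) ↔ x ∈ V) →
    pvALoop byId fuel f visS d = d + pvW byId V k fuel := by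
  intro fuel
  induction fuel with
  | zero => intro V visS k f d _ _; simp [pvALoop, pvW]
  | succ fuel ih =>
    intro V visS k f d hget hvis
    have hid : pvAGet f "id" = some k := hcons (some k) f hget
    have hfne : f ≠ [] := by
      intro h
      have hnone : pvAGet ([] : List (String × Int)) "id" = none := rfl
      rw [h, hnone] at hid
      exact absurd hid (by simp)
    by_cases hkV : k ∈ V
    · have hmem : pvAGet f "id" ∈ visS := by rw [hid]; exact (hvis k).mpr hkV
      rw [pvW_zero_of_mem _ _ _ _ hkV]
      simp only [pvALoop]
      rw [if_pos (Or.inr hmem)]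
      simp
    · have hcond : ¬(f = [] ∨ pvAGet f "id" ∈ visS) := by
        push_neg
        exact ⟨hfne, by rw [hid]; intro hmm; exact hkV ((hvis k).mp hmm)⟩
      have hstep : pvStep byId k = pvBParentKey byId f := by
        unfold pvStep; rw [hget]
      simp only [pvALoop]
      rw [if_neg hcond]
      cases hpar : pvAParRaw f with
      | none =>
        have h0 : pvStep byId k = none := by rw [hstep, pvBPar_eq, hpar]
        rw [pvW_succ_none byId V k fuel hkV h0]
        simp
      | some p =>
        by_cases hp0 : p = 0
        · have h0 : pvStep byId k = none := by
            rw [hstep, pvBPar_eq, hpar]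
            simp [hp0]
          rw [pvW_succ_none byId V k fuel hkV h0]
          simp [hpar, hp0]
        · cases hgp : byId.get? (some p) with
          | none =>
            have h0 : pvStep byId k = none := by
              rw [hstep, pvBPar_eq, hpar]
              simp [hgp]
            rw [pvW_succ_none byId V k fuel hkV h0]
            simp [hpar, hp0, hgp]
          | some f' =>
            have h1 : pvStep byId k = some p := by
              rw [hstep, pvBPar_eq, hpar]
              simp [hp0, hgp]
            rw [pvW_succ_step byId V k p fuel hkV h1]
            have hvis' : ∀ x : Int, (some x) ∈ PySem.Set.add visS (pvAGet f "id") ↔ x ∈ k :: V := by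
              intro x
              rw [hid, PySem.Set.mem_add]
              simp [hvis x]
              tauto
            have hrec := ih (k :: V) (PySem.Set.add visS (pvAGet f "id")) p f' (d + 1) hgp hvis'
            simp only [hpar]
            rw [if_pos hp0]
            simp only [hgp, hrec]
            omega

theorem pvA_folder_some (folders : List (List (String × Int)))
    (hpre : Pre_calculate_folder_depth_py folders)
    (f : List (String × Int)) (i : Int) (hf : f ∈ folders)
    (hid : pvAGet f "id" = some i) :
    pvALoop (pvAById folders) (folders.length + 1) f PySem.Set.empty 0
      = pvL (pvAById folders) i := by
  have hget := pvById_get_unique folders hpre f i hf hid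
  rw [pvBridgeA (pvAById folders) (pvById_consistent folders) (folders.length + 1)
    [] PySem.Set.empty i f 0 hget (by intro x; simp [PySem.Set.empty])]
  unfold pvL
  rw [pvW_stab (pvAById folders) [] i (folders.length + 1) (pvCard (pvAById folders) + 2)
    (by rw [pvNfree_nil]; have := pvCard_le folders; omega)
    (by rw [pvNfree_nil]; omega)]
  simp

theorem pvA_folder_none (folders : List (List (String × Int)))
    (f : List (String × Int)) (hf : f ∈ folders) (hid : pvAGet f "id" = none) :
    pvALoop (pvAById folders) (folders.length + 1) f PySem.Set.empty 0
      = (match pvBParentKey (pvAById folders) f with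
         | some p => 1 + pvL (pvAById folders) p
         | none => 0) := by
  by_cases hf0 : f = []
  · subst hf0
    have hpk : pvBParentKey (pvAById folders) [] = none := rfl
    rw [hpk]
    simp [pvALoop]
  · simp only [pvALoop]
    have hcond : ¬(f = [] ∨ pvAGet f "id" ∈ (PySem.Set.empty : PySem.Set (Option Int))) := by
      push_neg
      exact ⟨hf0, by simp [PySem.Set.empty]⟩
    rw [if_neg hcond]
    cases hpar : pvAParRaw f with
    | none =>
      rw [pvBPar_eq, hpar]
    | some p =>
      by_cases hp0 : p = 0
      · rw [pvBPar_eq, hpar]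
        simp [hp0]
      · cases hgp : (pvAById folders).get? (some p) with
        | none =>
          rw [pvBPar_eq, hpar]
          simp [hp0, hgp]
        | some f' =>
          rw [pvBPar_eq, hpar]
          have hbr := pvBridgeA (pvAById folders) (pvById_consistent folders)
            (folders.length) [] (PySem.Set.add PySem.Set.empty (pvAGet f "id")) p f' (0 + 1) hgp
            (by intro x; rw [hid]; simp [PySem.Set.empty, PySem.Set.mem_add])
          simp only [hp0, hgp]
          rw [if_pos hp0, if_pos (show p ≠ 0 ∧ (some f').isSome = true from ⟨hp0, by simp⟩)]
          have hcard := pvCard_lt_of_none folders f hf hid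
          have hst : pvW (pvAById folders) [] p folders.length = pvL (pvAById folders) p := by
            unfold pvL
            exact pvW_stab (pvAById folders) [] p folders.length (pvCard (pvAById folders) + 2)
              (by rw [pvNfree_nil]; omega) (by rw [pvNfree_nil]; omega)
          rw [hbr, hst]
          simp

-- ---------- B: memo invariant ----------

def pvGood (byId : PySem.Dict (Option Int) (List (String × Int)))
    (memo : PySem.Dict Int Int) : Prop :=
  ∀ k, memo.contains k = true →
    memo.get? k = some (pvL byId k) ∧
    (∀ y, pvStep byId k = some y → memo.contains y = true)

theorem pvGood_reach (byId : PySem.Dict (Option Int) (List (String × Int)))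
    (memo : PySem.Dict Int Int) (hg : pvGood byId memo) (y a : Int)
    (hy : memo.contains y = true) (h : pvReach byId y a) : memo.contains a = true := by
  obtain ⟨n, hn⟩ := h
  induction n generalizing y with
  | zero => simp [pvIter] at hn; exact hn ▸ hy
  | succ n ih =>
    simp only [pvIter] at hn
    cases hs : pvStep byId y with
    | none => rw [hs] at hn; exact absurd hn (by simp)
    | some z =>
      rw [hs] at hn
      exact ih z ((hg y hy).2 z hs) hn

theorem pvBackfill_reverse (byId : PySem.Dict (Option Int) (List (String × Int)))
    (memo : PySem.Dict Int Int) (rp : List Int) :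
    pvBBackfill byId memo rp.reverse = rp.foldl (fun memo node =>
      match byId.get? (some node) with
      | some f =>
        match pvBParentKey byId f with
        | some q => memo.insert node (memo.getD q 0 + 1)
        | none => memo
      | none => memo) memo := by
  unfold pvBBackfill
  rw [List.reverse_reverse]

theorem pvBackfill_go (byId : PySem.Dict (Option Int) (List (String × Int))) :
    ∀ (rp : List Int) (memo : PySem.Dict Int Int) (q : Int),
    pvGood byId memo → memo.contains q = true →
    (q :: rp).IsChain (fun x y => pvStep byId y = some x) →
    rp.Nodup → (∀ z ∈ rp, memo.contains z = false) →
    pvGood byId (pvBBackfill byId memo rp.reverse) ∧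
    (∀ z ∈ rp, (pvBBackfill byId memo rp.reverse).contains z = true) ∧
    (∀ x, x ∉ rp → (pvBBackfill byId memo rp.reverse).get? x = memo.get? x) := by
  intro rp
  induction rp with
  | nil =>
    intro memo q hg _ _ _ _
    rw [pvBackfill_reverse]
    exact ⟨hg, by simp, fun x _ => rfl⟩
  | cons z rp' ih =>
    intro memo q hg hq hch hnd hfresh
    have hrel : pvStep byId z = some q :=
      List.IsChain.rel (R := fun x y => pvStep byId y = some x) hch
    obtain ⟨f, hgf⟩ : ∃ f, byId.get? (some z) = some f := by
      unfold pvStep at hrel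
      cases hgz : byId.get? (some z) with
      | none => rw [hgz] at hrel; exact absurd hrel (by simp)
      | some f => exact ⟨f, rfl⟩
    have hpk : pvBParentKey byId f = some q := by
      unfold pvStep at hrel
      rw [hgf] at hrel
      exact hrel
    have hqz : ¬ pvReach byId q z := by
      intro hr
      have := pvGood_reach byId memo hg q z hq hr
      rw [hfresh z (by simp)] at this
      exact absurd this (by simp)
    have hLz : pvL byId z = 1 + pvL byId q := pvL_step byId z q hrel hqz
    have hgetq : memo.getD q 0 = pvL byId q := by
      rw [PySem.Dict.getD_eq_get?_getD, (hg q hq).1]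
      rfl
    have hzq : z ≠ q := by
      intro h
      exact hqz (h ▸ pvReach_refl byId z)
    -- one fold step
    have hstep1 : (z :: rp').foldl (fun memo node =>
        match byId.get? (some node) with
        | some f =>
          match pvBParentKey byId f with
          | some q => memo.insert node (memo.getD q 0 + 1)
          | none => memo
        | none => memo) memo
      = rp'.foldl (fun memo node =>
        match byId.get? (some node) with
        | some f =>
          match pvBParentKey byId f with
          | some q => memo.insert node (memo.getD q 0 + 1)
          | none => memo
        | none => memo) (memo.insert z (memo.getD q 0 + 1)) := by
      simp only [List.foldl_cons, hgf, hpk]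
    have hgood' : pvGood byId (memo.insert z (memo.getD q 0 + 1)) := by
      intro k hk
      rw [PySem.Dict.contains_insert] at hk
      by_cases hkz : k = z
      · subst hkz
        refine ⟨?_, ?_⟩
        · rw [PySem.Dict.get?_insert_self, hgetq, hLz]
          congr 1
          omega
        · intro y hy
          rw [hrel] at hy
          cases hy
          rw [PySem.Dict.contains_insert, hq]
          exact Bool.or_true _
      · have hk' : memo.contains k = true := by
          rcases Bool.or_eq_true_iff.mp hk with h | h
          · exact absurd (by simpa using h) hkz
          · exact h
        obtain ⟨h1, h2⟩ := hg k hk'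
        refine ⟨by rw [PySem.Dict.get?_insert, if_neg hkz, h1], ?_⟩
        intro y hy
        rw [PySem.Dict.contains_insert, h2 y hy]
        exact Bool.or_true _
    have hcz : (memo.insert z (memo.getD q 0 + 1)).contains z = true := by
      rw [PySem.Dict.contains_insert]; simp
    have hch' : (z :: rp').IsChain (fun x y => pvStep byId y = some x) :=
      List.IsChain.of_cons hch
    have hnd' : rp'.Nodup := (List.nodup_cons.mp hnd).2
    have hfresh' : ∀ z' ∈ rp', (memo.insert z (memo.getD q 0 + 1)).contains z' = false := by
      intro z' hz'
      rw [PySem.Dict.contains_insert]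
      have hne : z' ≠ z := fun h => (List.nodup_cons.mp hnd).1 (h ▸ hz')
      simp [hne, hfresh z' (by simp [hz'])]
    have hmain := ih (memo.insert z (memo.getD q 0 + 1)) z hgood' hcz hch' hnd' hfresh'
    rw [pvBackfill_reverse] at hmain ⊢
    rw [hstep1]
    obtain ⟨hG, hMem, hPres⟩ := hmain
    refine ⟨hG, ?_, ?_⟩
    · intro w hw
      rcases List.mem_cons.mp hw with h | h
      · subst h
        have hznotin : w ∉ rp' := (List.nodup_cons.mp hnd).1
        rw [PySem.Dict.contains_eq_isSome_get?, hPres w hznotin,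
          ← PySem.Dict.contains_eq_isSome_get?]
        exact hcz
      · exact hMem w h
    · intro x hx
      have hx1 : x ∉ rp' := fun h => hx (by simp [h])
      have hx2 : x ≠ z := fun h => hx (by simp [h])
      rw [hPres x hx1, PySem.Dict.get?_insert, if_neg hx2]

theorem pvBackfill_correct (byId : PySem.Dict (Option Int) (List (String × Int)))
    (path : List Int) (memo : PySem.Dict Int Int) (q : Int)
    (hg : pvGood byId memo) (hq : memo.contains q = true)
    (hchain : (path ++ [q]).IsChain (pvRel byId))
    (hnd : path.Nodup) (hfresh : ∀ z ∈ path, memo.contains z = false) :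
    pvGood byId (pvBBackfill byId memo path) ∧
    (∀ z ∈ path, (pvBBackfill byId memo path).contains z = true) ∧
    (∀ x, x ∉ path → (pvBBackfill byId memo path).get? x = memo.get? x) := by
  have hchr : (q :: path.reverse).IsChain (fun x y => pvStep byId y = some x) := by
    have h1 : ((path ++ [q]).reverse).IsChain (fun x y => pvStep byId y = some x) := by
      rw [List.isChain_reverse]
      exact hchain
    simpa using h1
  have hmain := pvBackfill_go byId path.reverse memo q hg hq hchr
    (by simpa using hnd) (by intro z hz; exact hfresh z (by simpa using hz))
  rw [List.reverse_reverse] at hmain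
  refine ⟨hmain.1, ?_, ?_⟩
  · intro z hz; exact hmain.2.1 z (by simpa using hz)
  · intro x hx; exact hmain.2.2 x (by simpa using hx)

theorem pvFoldInsertConst :
    ∀ (l : List Int) (memo : PySem.Dict Int Int) (c : Int) (x : Int),
    (l.foldl (fun m node => m.insert node c) memo).get? x
      = if x ∈ l then some c else memo.get? x := by
  intro l
  induction l with
  | nil => intro memo c x; simp
  | cons n t ih =>
    intro memo c x
    rw [List.foldl_cons, ih]
    by_cases hxt : x ∈ t
    · rw [if_pos hxt, if_pos (by simp [hxt])]
    · rw [if_neg hxt]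
      by_cases hxn : x = n
      · subst hxn
        rw [PySem.Dict.get?_insert_self, if_pos (by simp)]
      · rw [PySem.Dict.get?_insert, if_neg hxn, if_neg (by simp [hxn, hxt])]

theorem pvNfree_concat (byId : PySem.Dict (Option Int) (List (String × Int)))
    (V : List Int) (k : Int) (hk : pvIsKey byId k) (hnv : k ∉ V) :
    pvNfree byId (V ++ [k]) + 1 = pvNfree byId V := by
  unfold pvNfree
  have hmem : k ∈ pvKeysF byId \ V.toFinset := by
    simp [Finset.mem_sdiff, pvIsKey_mem_keysF byId k hk, hnv]
  have hset : pvKeysF byId \ (V ++ [k]).toFinset = (pvKeysF byId \ V.toFinset).erase k := by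
    ext x
    simp [Finset.mem_sdiff, Finset.mem_erase, List.mem_toFinset]
    tauto
  rw [hset, Finset.card_erase_of_mem hmem]
  have hpos : 0 < (pvKeysF byId \ V.toFinset).card := Finset.card_pos.mpr ⟨k, hmem⟩
  omega

theorem pvResolve_correct (byId : PySem.Dict (Option Int) (List (String × Int))) :
    ∀ (fuel : Nat) (memo pos : PySem.Dict Int Int) (path : List Int) (cur : Int),
    pvGood byId memo →
    (∀ z : Int, pos.get? z = (PySem.List.index? path z).map (fun n : Nat => (n : Int))) →
    path.Nodup →
    (path ++ [cur]).IsChain (pvRel byId) →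
    (∀ z ∈ path, memo.contains z = false) →
    pvIsKey byId cur →
    pvNfree byId path + 1 ≤ fuel →
    pvGood byId (pvBResolveLoop byId fuel memo pos path cur) ∧
    (pvBResolveLoop byId fuel memo pos path cur).contains cur = true ∧
    (∀ z ∈ path, (pvBResolveLoop byId fuel memo pos path cur).contains z = true) := by
  intro fuel
  induction fuel with
  | zero => intro memo pos path cur _ _ _ _ _ _ hfu; omega
  | succ F ih =>
    intro memo pos path cur hg hpos hnd hch hfresh hkey hfu
    simp only [pvBResolveLoop]
    by_cases hmc : memo.contains cur = true
    · rw [if_pos hmc]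
      have hcp : cur ∉ path := by
        intro h
        rw [hfresh cur h] at hmc
        exact absurd hmc (by simp)
      obtain ⟨hG, hMem, hPres⟩ :=
        pvBackfill_correct byId path memo cur hg hmc hch hnd hfresh
      refine ⟨hG, ?_, hMem⟩
      rw [PySem.Dict.contains_eq_isSome_get?, hPres cur hcp,
        ← PySem.Dict.contains_eq_isSome_get?]
      exact hmc
    · rw [if_neg hmc]
      by_cases hcp : cur ∈ path
      · -- cycle branch
        obtain ⟨jn, hjn⟩ : ∃ jn, PySem.List.index? path cur = some jn := by
          have := (PySem.List.index?_isSome_iff path cur).mpr hcp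
          cases h : PySem.List.index? path cur with
          | none => rw [h] at this; exact absurd this (by simp)
          | some j => exact ⟨j, rfl⟩
        obtain ⟨hjlt, hjget, _⟩ := PySem.List.getElem_of_index?_eq_some hjn
        rw [hpos cur, hjn]
        simp only [Option.map_some]
        have htn : ((jn : Int)).toNat = jn := Int.toNat_natCast jn
        rw [htn]
        set suf := path.drop (jn + 1) with hsuf
        have hdrop : path.drop jn = cur :: suf := by
          rw [hsuf, List.drop_eq_getElem_cons hjlt, hjget]
        set pre := path.take jn with hpre
        have hsplit : path = pre ++ cur :: suf := by
          rw [hpre, ← hdrop, List.take_append_drop]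
        have hprelen : pre.length = jn := by
          rw [hpre, List.length_take]
          omega
        -- the detected cycle
        have hcyc : pvCyc byId (cur :: suf) := by
          refine ⟨by simp, ?_, ?_⟩
          · rw [← hdrop]
            exact hnd.sublist (List.drop_sublist jn path)
          · have h1 : ((pre ++ cur :: suf) ++ [cur]).IsChain (pvRel byId) := by
              rw [← hsplit]; exact hch
            have h2 : (pre ++ ((cur :: suf) ++ [cur])).IsChain (pvRel byId) := by
              simpa [List.append_assoc] using h1
            have h3 := List.IsChain.right_of_append h2
            simpa using h3
        have hclen : ((path.length : Int) - (jn : Int)) = ((cur :: suf).length : Int) := by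
          have : path.length = pre.length + (cur :: suf).length := by
            rw [hsplit]; simp
          rw [this, hprelen]
          push_cast
          omega
        -- after the constant fold, every cycle node has value = cycle length
        set c : Int := (path.length : Int) - (jn : Int) with hc
        set memo₂ := ((path.drop jn).foldl (fun m node => m.insert node c) memo) with hm2
        have hLcyc : ∀ z ∈ cur :: suf, pvL byId z = c := by
          intro z hz
          rw [pvL_cyc byId (cur :: suf) hcyc z hz]
          exact hclen.symm
        have hget2 : ∀ x, memo₂.get? x = if x ∈ cur :: suf then some c else memo.get? x := by
          intro x
          rw [hm2, hdrop]
          exact pvFoldInsertConst (cur :: suf) memo c x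
        have hcont2 : ∀ x, memo₂.contains x = true ↔ (x ∈ cur :: suf ∨ memo.contains x = true) := by
          intro x
          rw [PySem.Dict.contains_eq_isSome_get?, hget2 x]
          by_cases hx : x ∈ cur :: suf
          · simp [hx]
          · simp [hx, PySem.Dict.contains_eq_isSome_get?]
        have hg2 : pvGood byId memo₂ := by
          intro k hk
          rcases (hcont2 k).mp hk with hkr | hkm
          · refine ⟨by rw [hget2 k, if_pos hkr, hLcyc k hkr], ?_⟩
            intro y hy
            obtain ⟨y', hy'r, hy's⟩ := pvCyc_next byId (cur :: suf) hcyc k hkr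
            have : y = y' := by rw [hy's] at hy; exact (Option.some_inj.mp hy).symm
            subst this
            exact (hcont2 y).mpr (Or.inl hy'r)
          · have hknr : k ∉ cur :: suf := by
              intro hkr
              have : memo.contains k = false := by
                rcases List.mem_cons.mp hkr with h | h
                · exact h ▸ (by simpa using hmc)
                · exact hfresh k (by rw [hsplit]; simp [h])
              rw [this] at hkm
              exact absurd hkm (by simp)
            obtain ⟨h1, h2⟩ := hg k hkm
            refine ⟨by rw [hget2 k, if_neg hknr, h1], ?_⟩
            intro y hy
            exact (hcont2 y).mpr (Or.inr (h2 y hy))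
        -- backfill the prefix
        have hccur : memo₂.contains cur = true := (hcont2 cur).mpr (Or.inl (by simp))
        have hchpre : (pre ++ [cur]).IsChain (pvRel byId) := by
          have h1 : ((pre ++ [cur]) ++ (suf ++ [cur])).IsChain (pvRel byId) := by
            have : path ++ [cur] = (pre ++ [cur]) ++ (suf ++ [cur]) := by
              rw [hsplit]; simp
            rw [← this]; exact hch
          exact List.IsChain.left_of_append h1
        have hndpre : pre.Nodup := hnd.sublist (hpre ▸ List.take_sublist jn path)
        have hdisj : ∀ z ∈ pre, z ∉ cur :: suf := by
          intro z hz hz2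
          have := hnd
          rw [hsplit, List.nodup_append] at this
          exact this.2.2 z hz z hz2 rfl
        have hfresh2 : ∀ z ∈ pre, memo₂.contains z = false := by
          intro z hz
          rw [PySem.Dict.contains_eq_isSome_get?, hget2 z, if_neg (hdisj z hz),
            ← PySem.Dict.contains_eq_isSome_get?]
          exact hfresh z (by rw [hsplit]; simp [hz])
        obtain ⟨hG, hMem, hPres⟩ :=
          pvBackfill_correct byId pre memo₂ cur hg2 hccur hchpre hndpre hfresh2
        have hfinal : ∀ x ∈ cur :: suf, (pvBBackfill byId memo₂ pre).contains x = true := by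
          intro x hx
          have hxnp : x ∉ pre := fun h => hdisj x h hx
          rw [PySem.Dict.contains_eq_isSome_get?, hPres x hxnp,
            ← PySem.Dict.contains_eq_isSome_get?]
          exact (hcont2 x).mpr (Or.inl hx)
        refine ⟨hG, ?_, ?_⟩
        · exact hfinal cur (by simp)
        · intro z hz
          rw [hsplit] at hz
          rcases List.mem_append.mp hz with h | h
          · exact hMem z h
          · exact hfinal z h
      · -- extend the path
        have hidx : PySem.List.index? path cur = none :=
          (PySem.List.index?_eq_none_iff path cur).mpr hcp
        rw [hpos cur, hidx]
        simp only [Option.map_none]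
        obtain ⟨f, hgf⟩ : ∃ f, byId.get? (some cur) = some f := by
          unfold pvIsKey at hkey
          cases h : byId.get? (some cur) with
          | none => rw [h] at hkey; exact absurd hkey (by simp)
          | some f => exact ⟨f, rfl⟩
        simp only [hgf]
        have hstepc : pvStep byId cur = pvBParentKey byId f := by
          unfold pvStep; rw [hgf]
        cases hpk : pvBParentKey byId f with
        | none =>
          -- terminal node
          have hterm : pvStep byId cur = none := by rw [hstepc, hpk]
          have hL0 : pvL byId cur = 0 := pvL_terminal byId cur hterm
          simp only [hpk, List.dropLast_concat]
          have hg2 : pvGood byId (memo.insert cur 0) := by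
            intro k hk
            rw [PySem.Dict.contains_insert] at hk
            by_cases hkc : k = cur
            · subst hkc
              refine ⟨by rw [PySem.Dict.get?_insert_self, hL0], ?_⟩
              intro y hy
              rw [hterm] at hy
              exact absurd hy (by simp)
            · have hk' : memo.contains k = true := by
                rcases Bool.or_eq_true_iff.mp hk with h | h
                · exact absurd (by simpa using h) hkc
                · exact h
              obtain ⟨h1, h2⟩ := hg k hk'
              refine ⟨by rw [PySem.Dict.get?_insert, if_neg hkc, h1], ?_⟩
              intro y hy
              rw [PySem.Dict.contains_insert, h2 y hy]
              exact Bool.or_true _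
          have hccur : (memo.insert cur 0).contains cur = true := by
            rw [PySem.Dict.contains_insert]; simp
          have hfresh2 : ∀ z ∈ path, (memo.insert cur 0).contains z = false := by
            intro z hz
            rw [PySem.Dict.contains_insert]
            have hne : z ≠ cur := fun h => hcp (h ▸ hz)
            simp [hne, hfresh z hz]
          obtain ⟨hG, hMem, hPres⟩ :=
            pvBackfill_correct byId path (memo.insert cur 0) cur hg2 hccur hch hnd hfresh2
          refine ⟨hG, ?_, hMem⟩
          rw [PySem.Dict.contains_eq_isSome_get?, hPres cur hcp,
            ← PySem.Dict.contains_eq_isSome_get?]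
          exact hccur
        | some nxt =>
          -- follow the parent pointer
          simp only [hpk]
          have hstep : pvStep byId cur = some nxt := by rw [hstepc, hpk]
          have hpos' : ∀ z : Int, (pos.insert cur (path.length : Int)).get? z
              = (PySem.List.index? (path ++ [cur]) z).map (fun n : Nat => (n : Int)) := by
            intro z
            rw [PySem.Dict.get?_insert]
            by_cases hzc : z = cur
            · subst hzc
              rw [if_pos rfl, PySem.List.index?_append_singleton_self path z hcp]
              simp
            · rw [if_neg hzc, hpos z]
              by_cases hzp : z ∈ path
              · rw [PySem.List.index?_append_of_mem [cur] hzp]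
              · rw [(PySem.List.index?_eq_none_iff path z).mpr hzp,
                  (PySem.List.index?_eq_none_iff (path ++ [cur]) z).mpr
                    (by simp [hzp, hzc])]
          have hnd' : (path ++ [cur]).Nodup := by
            rw [List.nodup_append]
            refine ⟨hnd, by simp, ?_⟩
            intro a ha b hb
            have hb' : b = cur := by simpa using hb
            subst hb'
            exact fun h => hcp (h ▸ ha)
          have hch' : ((path ++ [cur]) ++ [nxt]).IsChain (pvRel byId) := by
            apply List.IsChain.append hch (by simp)
            intro a ha b hb
            have hlast : (path ++ [cur]).getLast? = some cur := List.getLast?_concat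
            rw [hlast] at ha
            have hb' : b = nxt := by have := hb; simp at this; omega
            have ha' : a = cur := by have := ha; simp at this; omega
            rw [ha', hb']
            exact hstep
          have hfresh' : ∀ z ∈ path ++ [cur], memo.contains z = false := by
            intro z hz
            rcases List.mem_append.mp hz with h | h
            · exact hfresh z h
            · have : z = cur := by simpa using h
              subst this
              simpa using hmc
          have hkey' : pvIsKey byId nxt := pvStep_isKey_tgt byId cur nxt hstep
          have hfu' : pvNfree byId (path ++ [cur]) + 1 ≤ F := by
            have := pvNfree_concat byId path cur hkey hcp
            omega
          obtain ⟨hG, hC, hMem⟩ := ih memo (pos.insert cur (path.length : Int))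
            (path ++ [cur]) nxt hg hpos' hnd' hch' hfresh' hkey' hfu'
          refine ⟨hG, ?_, ?_⟩
          · exact hMem cur (by simp)
          · intro z hz
            exact hMem z (by simp [hz])

-- ---------- outer loops ----------

theorem pvBParentKey_isKey (byId : PySem.Dict (Option Int) (List (String × Int)))
    (f : List (String × Int)) (p : Int) (h : pvBParentKey byId f = some p) :
    pvIsKey byId p := by
  unfold pvBParentKey at h
  unfold pvIsKey
  cases hp : (match pvBGet f "parent_id" with
    | some v => if v = 0 then pvBGet f "parent" else some v
    | none => pvBGet f "parent") with
  | none => simp [hp] at h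
  | some v =>
    simp only [hp] at h
    by_cases hv : v ≠ 0 ∧ (byId.get? (some v)).isSome
    · simp only [if_pos hv] at h
      cases h; exact hv.2
    · simp [if_neg hv] at h

theorem pvOuter (folders : List (List (String × Int)))
    (hpre : Pre_calculate_folder_depth_py folders) :
    ∀ (rest : List (List (String × Int))) (acc : Int) (memo : PySem.Dict Int Int),
    pvGood (pvAById folders) memo → (∀ f ∈ rest, f ∈ folders) →
    rest.foldl (fun maxDepth folder =>
      max maxDepth (pvALoop (pvAById folders) (folders.length + 1) folder PySem.Set.empty 0)) acc
    = (rest.foldl (fun (st : PySem.Dict Int Int × Int) f =>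
        match pvBGet f "id" with
        | some i =>
          let memo := pvBResolveLoop (pvBById folders) (folders.length + 1) st.1 PySem.Dict.empty [] i
          (memo, max st.2 (memo.getD i 0))
        | none =>
          match pvBParentKey (pvBById folders) f with
          | some p =>
            let memo := pvBResolveLoop (pvBById folders) (folders.length + 1) st.1 PySem.Dict.empty [] p
            (memo, max st.2 (1 + memo.getD p 0))
          | none => (st.1, max st.2 0)) (memo, acc)).2 := by
  have hbid : pvBById folders = pvAById folders := rfl
  intro rest
  induction rest with
  | nil => intro acc memo _ _; simp
  | cons f t ih =>
    intro acc memo hgood hsub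
    have hf : f ∈ folders := hsub f (by simp)
    have hsub' : ∀ g ∈ t, g ∈ folders := fun g hg => hsub g (by simp [hg])
    rw [List.foldl_cons, List.foldl_cons]
    have hresolve : ∀ (k : Int), pvIsKey (pvAById folders) k →
        pvGood (pvAById folders)
          (pvBResolveLoop (pvAById folders) (folders.length + 1) memo PySem.Dict.empty [] k) ∧
        (pvBResolveLoop (pvAById folders) (folders.length + 1) memo PySem.Dict.empty [] k).getD k 0
          = pvL (pvAById folders) k := by
      intro k hkey
      obtain ⟨hG, hC, _⟩ := pvResolve_correct (pvAById folders) (folders.length + 1)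
        memo PySem.Dict.empty [] k hgood
        (by intro z; rw [PySem.Dict.get?_empty]; rfl)
        (by simp)
        (by simp)
        (by intro z hz; exact absurd hz (by simp))
        hkey
        (by rw [pvNfree_nil]; have := pvCard_le folders; omega)
      refine ⟨hG, ?_⟩
      rw [PySem.Dict.getD_eq_get?_getD, (hG k hC).1]
      rfl
    cases hid : pvAGet f "id" with
    | some i =>
      have hbg : pvBGet f "id" = some i := hid
      have hgetf := pvById_get_unique folders hpre f i hf hid
      have hkey : pvIsKey (pvAById folders) i := by
        unfold pvIsKey; rw [hgetf]; rfl
      obtain ⟨hG, hval⟩ := hresolve i hkey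
      rw [pvA_folder_some folders hpre f i hf hid]
      simp only [hbg, hbid]
      rw [ih (max acc (pvL (pvAById folders) i)) _ hG hsub']
      rw [hval]
      rfl
    | none =>
      have hbg : pvBGet f "id" = none := hid
      rw [pvA_folder_none folders f hf hid]
      simp only [hbg, hbid]
      cases hpk : pvBParentKey (pvAById folders) f with
      | some p =>
        have hkey : pvIsKey (pvAById folders) p :=
          pvBParentKey_isKey (pvAById folders) f p hpk
        obtain ⟨hG, hval⟩ := hresolve p hkey
        simp only [hpk]
        rw [ih (max acc (1 + pvL (pvAById folders) p)) _ hG hsub']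
        rw [hval]
        rfl
      | none =>
        simp only [hpk]
        rw [ih (max acc 0) memo hgood hsub']
        rfl

-- ===== VERDICT (by name: the statement is the Claim_ definition above) =====
theorem calculate_folder_depth_py_spec : Claim_equal_calculate_folder_depth_py := by
  intro folders _hdom hpre
  unfold Spec_calculate_folder_depth_py
  unfold calculate_folder_depth_py calculate_folder_depth_py_alt
  have h := pvOuter folders hpre folders 0 PySem.Dict.empty
    (by intro k hk; rw [PySem.Dict.contains_empty] at hk; exact absurd hk (by simp))
    (fun f hf => hf)
  exact h
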